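-- pv_equiv track=rewrite | github.com/prevostdomitille/optimisation_airport | dm_optim/main/glutton_by_pairs.py | excentricity_door
-- ===== SOURCE A (Python) =====
-- def excentricity_door(distances, size):
--     doors = []
--     for i in range(size):
--         temp = 0
--         for j in range(size):
--             temp += distances[j][i]
--         doors.insert(i, temp)
--     return doors
-- ===== SOURCE B (Python) =====
-- def excentricity_door(distances, size):
--     doors = [0] * size
--     for row in distances[:size]:
--         doors = [d + x for d, x in zip(doors, row)]
--     return doors
-- ===== Notes on version B (the rewrite author's own statement) =====
-- stated objective: alternative
-- what changed: B replaces A's per-column inner indexing loop with doors.insert by slicing the first size rows and folding them with element-wise vector addition via zip, maintaining an accumulator vector with no index arithmetic.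
import Mathlib
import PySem

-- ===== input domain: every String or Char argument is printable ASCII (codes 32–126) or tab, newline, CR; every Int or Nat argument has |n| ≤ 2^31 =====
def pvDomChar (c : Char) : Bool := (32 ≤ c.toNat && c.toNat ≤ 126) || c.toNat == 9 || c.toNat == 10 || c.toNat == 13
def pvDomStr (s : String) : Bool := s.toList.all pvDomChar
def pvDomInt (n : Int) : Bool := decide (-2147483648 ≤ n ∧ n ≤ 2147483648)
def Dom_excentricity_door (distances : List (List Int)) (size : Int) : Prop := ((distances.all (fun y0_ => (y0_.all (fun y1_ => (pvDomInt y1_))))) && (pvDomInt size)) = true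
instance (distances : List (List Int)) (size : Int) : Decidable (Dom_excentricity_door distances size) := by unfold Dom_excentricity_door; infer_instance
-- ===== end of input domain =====

-- B computes the same column sums by folding the first size rows with element-wise
-- vector addition (zip) over an accumulator, instead of A's per-column indexed inner
-- loop with doors.insert.

-- ===== PORT A =====
def excentricity_door (distances : List (List Int)) (size : Int) : List Int :=
  (PySem.List.pyRange 0 size 1).foldl
    (fun doors i =>
      PySem.List.insert doors i
        ((PySem.List.pyRange 0 size 1).foldl
          (fun temp j => temp + PySem.List.pyGetD (PySem.List.pyGetD distances j []) i 0) 0))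
    []

-- ===== PORT B =====
def excentricity_door_alt (distances : List (List Int)) (size : Int) : List Int :=
  (PySem.List.slice distances none (some size)).foldl
    (fun doors row => (doors.zip row).map (fun p => p.1 + p.2))
    (List.replicate size.toNat 0)

-- ===== PRECONDITION & SPEC =====
-- Pre_: exactly the inputs on which the Python A returns (no IndexError): each of the first
-- size rows exists and has at least size entries.
def Pre_excentricity_door (distances : List (List Int)) (size : Int) : Prop :=
  size ≤ (distances.length : Int) ∧ ∀ row ∈ distances.take size.toNat, size ≤ (row.length : Int)
instance (distances : List (List Int)) (size : Int) : Decidable (Pre_excentricity_door distances size) := by unfold Pre_excentricity_door; infer_instance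
def pvWitness_excentricity_door : List (List Int) × Int := ([[0, 1], [2, 3]], 2)

def Spec_excentricity_door (distances : List (List Int)) (size : Int) (out : List Int) : Prop := out = excentricity_door_alt distances size
instance (distances : List (List Int)) (size : Int) (out : List Int) : Decidable (Spec_excentricity_door distances size out) := by unfold Spec_excentricity_door; infer_instance

-- ===== CLAIM =====
def Claim_equal_excentricity_door : Prop := ∀ (distances : List (List Int)) (size : Int), Dom_excentricity_door distances size → Pre_excentricity_door distances size → Spec_excentricity_door distances size (excentricity_door distances size)

-- ===== LEMMAS AND PROOFS =====

-- A's outer loop: doors.insert(i, temp) when doors already has i elements appends, so the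
-- loop builds the per-index map of its body's value.
theorem pv_foldl_insert_map (g : Int → Int) (n : Nat) :
    (PySem.List.pyRange 0 (n : Int) 1).foldl
      (fun doors i => PySem.List.insert doors i (g i)) []
    = (PySem.List.pyRange 0 (n : Int) 1).map g := by
  induction n with
  | zero => simp [PySem.List.pyRange_one_eq_nil]
  | succ m ih =>
    have hc : ((m + 1 : Nat) : Int) = (m : Int) + 1 := by push_cast; ring
    rw [hc, PySem.List.pyRange_one_succ_right (by positivity)]
    rw [List.foldl_append, List.map_append, ih]
    simp only [List.foldl_cons, List.foldl_nil, List.map_cons, List.map_nil]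
    set xs := List.map g (PySem.List.pyRange 0 (m : Int) 1) with hxs
    have hlen : xs.length = m := by
      simp [hxs, PySem.List.length_pyRange_one]
    rw [show ((m : Int)) = ((xs.length : Nat) : Int) by rw [hlen],
        PySem.List.insert_natCast xs xs.length _ le_rfl]
    simp

-- B's fold: summing rows element-wise (zip) over an accumulator of length L, where every
-- row has at least L entries, yields per-index accumulator-plus-column-sum.
theorem pv_zipfold (rs : List (List Int)) :
    ∀ (doors : List Int), (∀ r ∈ rs, doors.length ≤ r.length) →
    rs.foldl (fun d r => (d.zip r).map (fun p => p.1 + p.2)) doors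
    = (List.range doors.length).map
        (fun i => doors.getD i 0 + (rs.map (fun r => r.getD i 0)).sum) := by
  induction rs with
  | nil =>
    intro doors _
    simp only [List.foldl_nil, List.map_nil, List.sum_nil, add_zero]
    apply List.ext_getElem
    · simp
    · intro i h1 h2
      simp at h2
      simp [List.getD_eq_getElem?_getD, List.getElem?_eq_getElem h2]
  | cons r rs ih =>
    intro doors h
    have hlr : doors.length ≤ r.length := h r (by simp)
    have hlen : ((doors.zip r).map (fun p : Int × Int => p.1 + p.2)).length = doors.length := by
      simp [List.length_zip]; omega
    rw [List.foldl_cons, ih _ (by intro r' hr'; rw [hlen]; exact h r' (by simp [hr']))]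
    rw [hlen]
    apply List.map_congr_left
    intro i hi
    rw [List.mem_range] at hi
    have hz : ((doors.zip r).map (fun p : Int × Int => p.1 + p.2)).getD i 0
        = doors.getD i 0 + r.getD i 0 := by
      have hi' : i < ((doors.zip r).map (fun p : Int × Int => p.1 + p.2)).length := by omega
      rw [List.getD_eq_getElem _ _ hi', List.getD_eq_getElem _ _ hi,
          List.getD_eq_getElem _ _ (by omega)]
      simp [List.getElem_zip]
    rw [hz]
    simp [add_assoc]

-- the column sums agree pointwise: A's indexed inner loop over j equals summing the
-- j-th entries of the first n rows.
theorem pv_colsum (distances : List (List Int)) (n : Nat) (hn : n ≤ distances.length)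
    (i : Nat) :
    (PySem.List.pyRange 0 (n : Int) 1).foldl
      (fun temp j => temp + PySem.List.pyGetD (PySem.List.pyGetD distances j []) (i : Int) 0) 0
    = ((distances.take n).map (fun r => r.getD i 0)).sum := by
  rw [PySem.List.foldl_add, zero_add]
  congr 1
  apply List.ext_getElem
  · simp [PySem.List.length_pyRange_one, hn]
  · intro k hk _
    simp only [List.getElem_map, PySem.List.getElem_pyRange_one, zero_add]
    have hk' : k < n := by
      have := hk; simp [PySem.List.length_pyRange_one] at this; omega
    have hkd : k < distances.length := by omega
    rw [PySem.List.pyGetD_natCast, PySem.List.pyGetD_natCast,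
        List.getD_eq_getElem _ _ hkd, List.getElem_take]

theorem pv_main (distances : List (List Int)) (size : Int)
    (hp : Pre_excentricity_door distances size) :
    excentricity_door distances size = excentricity_door_alt distances size := by
  obtain ⟨h1, h2⟩ := hp
  by_cases hs : size ≤ 0
  · rw [excentricity_door, excentricity_door_alt, PySem.List.pyRange_one_eq_nil hs]
    rw [pv_zipfold _ _ (by simp [Int.toNat_of_nonpos hs])]
    simp [Int.toNat_of_nonpos hs]
  · have h0 : ((size.toNat : Nat) : Int) = size := Int.toNat_of_nonneg (by omega)
    set n := size.toNat with hn
    have hnlen : n ≤ distances.length := by omega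
    rw [excentricity_door, excentricity_door_alt, ← h0]
    rw [PySem.List.slice_to_natCast]
    simp only [Int.toNat_natCast]
    have hall : ∀ r ∈ distances.take n, (List.replicate n (0 : Int)).length ≤ r.length := by
      intro r hr
      have := h2 r hr
      simp; omega
    rw [pv_zipfold _ _ hall]
    rw [pv_foldl_insert_map (fun i => (PySem.List.pyRange 0 (n : Int) 1).foldl
          (fun temp j => temp + PySem.List.pyGetD (PySem.List.pyGetD distances j []) i 0) 0) n]
    simp only [List.length_replicate]
    apply List.ext_getElem
    · simp [PySem.List.length_pyRange_one]
    · intro k hk1 hk2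
      have hk : k < n := by
        simp [PySem.List.length_pyRange_one] at hk1; omega
      simp only [List.getElem_map, PySem.List.getElem_pyRange_one, List.getElem_range, zero_add]
      rw [pv_colsum distances n hnlen k]
      simp

-- ===== VERDICT =====
theorem excentricity_door_spec : Claim_equal_excentricity_door := by
  intro distances size _ hp
  exact pv_main distances size hp
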